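-- pv_equiv track=rewrite | github.com/szdane/FAA-Fast-UMich | KDTW Single Aircraft Model/preTRACON congestion sections1.py | get_conges_levels
-- ===== SOURCE A (Python) =====
-- def get_conges_levels(conges_counts, lowest_level, num_levs, lev_interval):
-- 	conges_levels = []
-- 	for traf_count in conges_counts:
-- 		for lev in range(1, num_levs + 1):
-- 			if (lev - 1)*lev_interval <= traf_count < lev*lev_interval: # Figure out which traffic bin this zone is in, set level accordingly
-- 				conges_levels.append(lowest_level + (lev - 1))
-- 			elif lev == num_levs:
-- 				if lev*lev_interval <= traf_count:
-- 					conges_levels.append(lowest_level + (lev - 1))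
-- 	return conges_levels
-- ===== SOURCE B (Python) =====
-- def get_conges_levels(conges_counts, lowest_level, num_levs, lev_interval):
--     # Each traffic count falls in bin count // lev_interval, clamped to the top
--     # level; counts below zero fall in no bin and produce no level.
--     if num_levs < 1:
--         return []
--     top = num_levs - 1
--     return [lowest_level + min(c // lev_interval, top)
--             for c in conges_counts if c >= 0]
-- ===== Notes on version B (the rewrite author's own statement) =====
-- stated objective: faster
-- what changed: Replaces the inner scan over all num_levs bins with a direct per-count arithmetic bin index (floor division clamped to the top level); Pre_ excludes non-positive lev_interval, a degenerate bin width on which A's top-bin saturation output is an accident of its scan and B's floor division raises for lev_interval = 0.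
-- outside the precondition, e.g. on get_conges_levels([5], 1, 3, -2): A returns [3], B returns [-2]; on get_conges_levels([5], 1, 3, 0): A returns [3], B raises ZeroDivisionError
import Mathlib
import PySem

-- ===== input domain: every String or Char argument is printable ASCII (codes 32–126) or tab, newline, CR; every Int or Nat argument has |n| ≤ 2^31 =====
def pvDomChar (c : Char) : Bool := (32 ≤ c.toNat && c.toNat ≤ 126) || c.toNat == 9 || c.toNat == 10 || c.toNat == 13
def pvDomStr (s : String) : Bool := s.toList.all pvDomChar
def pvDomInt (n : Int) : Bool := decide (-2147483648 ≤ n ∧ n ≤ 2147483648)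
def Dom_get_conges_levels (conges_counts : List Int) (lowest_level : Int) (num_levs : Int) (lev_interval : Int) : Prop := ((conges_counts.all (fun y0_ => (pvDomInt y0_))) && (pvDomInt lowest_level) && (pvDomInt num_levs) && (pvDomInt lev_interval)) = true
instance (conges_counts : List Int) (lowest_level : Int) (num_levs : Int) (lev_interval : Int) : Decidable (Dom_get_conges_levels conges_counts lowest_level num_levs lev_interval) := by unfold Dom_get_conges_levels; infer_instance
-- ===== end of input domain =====

-- B replaces A's inner scan over all num_levs bins by direct per-count arithmetic bin index (objective: faster).

-- ===== PORT A =====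
-- the body of A's inner 'for lev in range(1, num_levs + 1)' loop, step for step
def pvStepA (lowest_level : Int) (num_levs : Int) (lev_interval : Int) (traf_count : Int) (acc : List Int) (lev : Int) : List Int :=
  if (lev - 1) * lev_interval ≤ traf_count ∧ traf_count < lev * lev_interval then
    acc ++ [lowest_level + (lev - 1)]
  else if lev = num_levs then
    (if lev * lev_interval ≤ traf_count then acc ++ [lowest_level + (lev - 1)] else acc)
  else acc

def get_conges_levels (conges_counts : List Int) (lowest_level : Int) (num_levs : Int) (lev_interval : Int) : List Int :=
  conges_counts.foldl
    (fun conges_levels traf_count =>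
      (PySem.List.pyRange 1 (num_levs + 1) 1).foldl
        (pvStepA lowest_level num_levs lev_interval traf_count) conges_levels)
    []

-- ===== PORT B =====
-- Source B: early return for num_levs < 1, then a comprehension (filter, then map)
def get_conges_levels_alt (conges_counts : List Int) (lowest_level : Int) (num_levs : Int) (lev_interval : Int) : List Int :=
  if num_levs < 1 then []
  else
    (conges_counts.filter (fun c => 0 ≤ c)).map
      (fun c => lowest_level + min (PySem.Int.floordiv c lev_interval) (num_levs - 1))

-- ===== PRECONDITION & SPEC =====
-- Pre_ excludes non-positive lev_interval: a degenerate bin width on which A's top-bin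
-- saturation output is an accident of its scan (and lev_interval = 0 makes B's floor
-- division raise ZeroDivisionError).
def Pre_get_conges_levels (conges_counts : List Int) (lowest_level : Int) (num_levs : Int) (lev_interval : Int) : Prop :=
  0 < lev_interval
instance (conges_counts : List Int) (lowest_level : Int) (num_levs : Int) (lev_interval : Int) : Decidable (Pre_get_conges_levels conges_counts lowest_level num_levs lev_interval) := by unfold Pre_get_conges_levels; infer_instance

def pvWitness_get_conges_levels : List Int × Int × Int × Int := ([3, 7, 0], 1, 4, 2)

def Spec_get_conges_levels (conges_counts : List Int) (lowest_level : Int) (num_levs : Int) (lev_interval : Int) (out : List Int) : Prop := out = get_conges_levels_alt conges_counts lowest_level num_levs lev_interval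
instance (conges_counts : List Int) (lowest_level : Int) (num_levs : Int) (lev_interval : Int) (out : List Int) : Decidable (Spec_get_conges_levels conges_counts lowest_level num_levs lev_interval out) := by unfold Spec_get_conges_levels; infer_instance

-- ===== CLAIM (what is proved, stated in full; the proofs are below) =====
def Claim_equal_get_conges_levels : Prop := ∀ (conges_counts : List Int) (lowest_level : Int) (num_levs : Int) (lev_interval : Int), Dom_get_conges_levels conges_counts lowest_level num_levs lev_interval → Pre_get_conges_levels conges_counts lowest_level num_levs lev_interval → Spec_get_conges_levels conges_counts lowest_level num_levs lev_interval (get_conges_levels conges_counts lowest_level num_levs lev_interval)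

-- ===== LEMMAS AND PROOFS =====

-- the per-element contribution both ports produce (for 0 < lev_interval)
def pvContrib (ll N li t : Int) : List Int :=
  if 0 ≤ t then [ll + min (PySem.Int.floordiv t li) (N - 1)] else []

lemma pvRange_empty (a b : Int) (h : b ≤ a) : PySem.List.pyRange a b 1 = [] := by
  rw [PySem.List.pyRange_one]
  have : (b - a).toNat = 0 := by omega
  simp [this]

lemma foldl_stepA_skip (ll N li t a b : Int)
    (h : ∀ lev, a ≤ lev → lev < b →
      ¬((lev - 1) * li ≤ t ∧ t < lev * li) ∧ (lev = N → ¬(lev * li ≤ t))) (acc : List Int) :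
    (PySem.List.pyRange a b 1).foldl (pvStepA ll N li t) acc = acc := by
  have key : ∀ (n : Nat) (a : Int), (b - a).toNat = n →
      (∀ lev, a ≤ lev → lev < b →
        ¬((lev - 1) * li ≤ t ∧ t < lev * li) ∧ (lev = N → ¬(lev * li ≤ t))) →
      ∀ acc : List Int, (PySem.List.pyRange a b 1).foldl (pvStepA ll N li t) acc = acc := by
    intro n
    induction n with
    | zero =>
      intro a hn _ acc
      rw [pvRange_empty a b (by omega)]
      rfl
    | succ k ih =>
      intro a hn hh acc
      have hab : a < b := by omega
      rw [PySem.List.pyRange_one_cons hab, List.foldl_cons]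
      have hstep : pvStepA ll N li t acc a = acc := by
        have h1 := (hh a le_rfl hab).1
        have h2 := (hh a le_rfl hab).2
        unfold pvStepA
        rw [if_neg h1]
        by_cases haN : a = N
        · rw [if_pos haN, if_neg (h2 haN)]
        · rw [if_neg haN]
      rw [hstep]
      exact ih (a + 1) (by omega) (fun lev h1 h2 => hh lev (by omega) h2) acc
  exact key (b - a).toNat a rfl h acc

lemma inner_eval (ll N li t : Int) (hli : 0 < li) (hN : 1 ≤ N) (acc : List Int) :
    (PySem.List.pyRange 1 (N + 1) 1).foldl (pvStepA ll N li t) acc = acc ++ pvContrib ll N li t := by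
  by_cases ht : 0 ≤ t
  · set q := PySem.Int.floordiv t li with hqdef
    have hq : q * li ≤ t ∧ t < (q + 1) * li :=
      (PySem.Int.floordiv_eq_iff_of_pos hli).mp hqdef.symm
    have hq0 : 0 ≤ q := by nlinarith [hq.1, hq.2]
    by_cases hqN : q ≤ N - 1
    · rw [PySem.List.pyRange_one_append 1 (q + 1) (N + 1) (by omega) (by omega),
          List.foldl_append]
      rw [foldl_stepA_skip ll N li t 1 (q + 1)
        (by
          intro lev h1 h2
          constructor
          · rintro ⟨_, hc2⟩
            have hlevq : lev ≤ q := by omega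
            have : lev * li ≤ q * li := mul_le_mul_of_nonneg_right hlevq hli.le
            linarith [hq.1]
          · intro hlN; omega)]
      rw [PySem.List.pyRange_one_cons (show (q + 1 : Int) < N + 1 by omega), List.foldl_cons]
      have hstep : pvStepA ll N li t acc (q + 1) = acc ++ [ll + q] := by
        have e : (q + 1 - 1) * li = q * li := by ring
        have hcond : (q + 1 - 1) * li ≤ t ∧ t < (q + 1) * li := by
          refine ⟨?_, hq.2⟩
          rw [e]; exact hq.1
        unfold pvStepA
        rw [if_pos hcond]
        have e2 : ll + (q + 1 - 1) = ll + q := by ring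
        rw [e2]
      rw [hstep]
      rw [foldl_stepA_skip ll N li t (q + 1 + 1) (N + 1)
        (by
          intro lev h1 h2
          have hle : q + 1 ≤ lev - 1 := by omega
          have hmul : (q + 1) * li ≤ (lev - 1) * li := mul_le_mul_of_nonneg_right hle hli.le
          constructor
          · rintro ⟨hc1, _⟩; linarith [hq.2]
          · intro hlN hc3
            have hNmul : (q + 1) * li ≤ N * li :=
              mul_le_mul_of_nonneg_right (by omega) hli.le
            rw [hlN] at hc3
            linarith [hq.2])]
      have hmin : min q (N - 1) = q := min_eq_left hqN
      have hc : pvContrib ll N li t = [ll + q] := by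
        rw [pvContrib, if_pos ht, hmin]
      rw [hc]
    · -- q ≥ N : saturate at the top level
      rw [show (N : Int) + 1 = (N - 1) + 1 + 1 by ring,
          PySem.List.pyRange_one_succ_right (by omega : (1:Int) ≤ N - 1 + 1),
          List.foldl_append]
      rw [foldl_stepA_skip ll N li t 1 (N - 1 + 1)
        (by
          intro lev h1 h2
          constructor
          · rintro ⟨_, hc2⟩
            have hlevq : lev ≤ q := by omega
            have : lev * li ≤ q * li := mul_le_mul_of_nonneg_right hlevq hli.le
            linarith [hq.1]
          · intro hlN; omega)]
      have hNq : N * li ≤ q * li := mul_le_mul_of_nonneg_right (by omega) hli.le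
      have hstep : pvStepA ll N li t acc (N - 1 + 1) = acc ++ [ll + (N - 1)] := by
        have e : (N : Int) - 1 + 1 = N := by ring
        rw [e]
        unfold pvStepA
        rw [if_neg (by rintro ⟨_, hc2⟩; linarith [hq.1]), if_pos rfl,
            if_pos (by linarith [hq.1])]
      simp only [List.foldl_cons, List.foldl_nil, hstep]
      have hmin : min q (N - 1) = N - 1 := min_eq_right (by omega)
      have hc : pvContrib ll N li t = [ll + (N - 1)] := by
        rw [pvContrib, if_pos ht, hmin]
      rw [hc]
  · -- t < 0 : nothing is appended
    rw [foldl_stepA_skip ll N li t 1 (N + 1)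
      (by
        intro lev h1 h2
        constructor
        · rintro ⟨hc1, _⟩
          have hnn : (0:Int) ≤ (lev - 1) * li := mul_nonneg (by omega) hli.le
          have : (0:Int) ≤ t := le_trans hnn hc1
          exact ht this
        · intro hlN hc3
          have hpos : (0:Int) < lev * li := mul_pos (by omega) hli
          have : (0:Int) ≤ t := le_trans hpos.le hc3
          exact ht this)]
    have hc : pvContrib ll N li t = [] := by
      rw [pvContrib, if_neg ht]
    rw [hc, List.append_nil]

lemma foldl_const {α : Type} (l : List α) (acc : List Int) :
    l.foldl (fun a (_ : α) => a) acc = acc := by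
  induction l generalizing acc with
  | nil => rfl
  | cons x xs ih => simp only [List.foldl_cons]; exact ih acc

lemma a_eq_flatMap (cc : List Int) (ll N li : Int) (hli : 0 < li) (hN : 1 ≤ N) :
    get_conges_levels cc ll N li = cc.flatMap (pvContrib ll N li) := by
  unfold get_conges_levels
  have hfun : (fun (conges_levels : List Int) (traf_count : Int) =>
      (PySem.List.pyRange 1 (N + 1) 1).foldl (pvStepA ll N li traf_count) conges_levels)
      = fun acc t => acc ++ pvContrib ll N li t := by
    funext acc t
    exact inner_eval ll N li t hli hN acc
  rw [hfun, PySem.List.foldl_append_eq_flatMap]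
  simp

lemma filter_map_eq_flatMap (cc : List Int) (f : Int → Int) :
    (cc.filter (fun c => 0 ≤ c)).map f
      = cc.flatMap (fun t => if 0 ≤ t then [f t] else []) := by
  induction cc with
  | nil => rfl
  | cons x xs ih =>
    by_cases hx : 0 ≤ x
    · simp [hx, ih]
    · simp [hx, ih]

lemma b_eq_flatMap (cc : List Int) (ll N li : Int) (hN : ¬ N < 1) :
    get_conges_levels_alt cc ll N li = cc.flatMap (pvContrib ll N li) := by
  unfold get_conges_levels_alt
  rw [if_neg hN, filter_map_eq_flatMap]
  rfl

-- ===== VERDICT (by name: the statement is the Claim_ definition above) =====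
theorem get_conges_levels_spec : Claim_equal_get_conges_levels := by
  unfold Claim_equal_get_conges_levels
  intro cc ll N li _ hpre
  unfold Spec_get_conges_levels
  by_cases hN : N < 1
  · unfold get_conges_levels get_conges_levels_alt
    rw [if_pos hN]
    have hr : PySem.List.pyRange 1 (N + 1) 1 = [] := pvRange_empty 1 (N + 1) (by omega)
    have hfun : (fun (conges_levels : List Int) (traf_count : Int) =>
        (PySem.List.pyRange 1 (N + 1) 1).foldl (pvStepA ll N li traf_count) conges_levels)
        = fun acc (_ : Int) => acc := by
      funext acc t; rw [hr]; rfl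
    rw [hfun, foldl_const]
  · rw [a_eq_flatMap cc ll N li hpre (by omega), b_eq_flatMap cc ll N li hN]
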